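-- pv_equiv track=rewrite | github.com/husniyeTansa/get-content-pdf-python | src/In/test2.py | merge_products
-- ===== SOURCE A (Python) =====
-- def merge_products(products):
--     merged_products = []
--     current_product = {}
--
--     for product in products:
--         if len(product) < 7 and current_product:  # Eğer bir ürün sütunu 7'den azsa birleştirme yap
--             for key, value in product.items():
--                 # Eğer birleştirme sırasında mevcut anahtar zaten varsa değeri birleştir
--                 if key in current_product:
--                     current_product[key] += " " + str(value)
--                 else:
--                     current_product[key] = value
--         else:
--             if current_product:
--                 merged_products.append(current_product)
--             current_product = product
--
--     # Son ürünü eklemeyi unutma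
--     if current_product:
--         merged_products.append(current_product)
--
--     return merged_products
-- ===== SOURCE B (Python) =====
-- def merge_products(products):
--     # Pass 1: partition the rows into groups; a group starts at every row with
--     # >= 7 columns, at the first row, and after an empty head.
--     groups = []
--     for product in products:
--         if len(product) >= 7 or not groups or not groups[-1][0]:
--             groups.append([product])
--         else:
--             groups[-1].append(product)
--     # Pass 2: fold each group's trailing rows into its head dict (in place).
--     merged_products = []
--     for group in groups:
--         head = group[0]
--         for row in group[1:]:
--             for key, value in row.items():
--                 if key in head:
--                     head[key] += " " + str(value)
--                 else:
--                     head[key] = value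
--         if head:
--             merged_products.append(head)
--     return merged_products
-- ===== Notes on version B (the rewrite author's own statement) =====
-- stated objective: alternative
-- what changed: A's single loop threading (merged, current) state is replaced by two passes: first partition the rows into groups (a new group at every row with >=7 keys, at the first row, and after an empty head), then fold each group's trailing rows into its head dict and collect the non-empty heads.
import Mathlib
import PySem

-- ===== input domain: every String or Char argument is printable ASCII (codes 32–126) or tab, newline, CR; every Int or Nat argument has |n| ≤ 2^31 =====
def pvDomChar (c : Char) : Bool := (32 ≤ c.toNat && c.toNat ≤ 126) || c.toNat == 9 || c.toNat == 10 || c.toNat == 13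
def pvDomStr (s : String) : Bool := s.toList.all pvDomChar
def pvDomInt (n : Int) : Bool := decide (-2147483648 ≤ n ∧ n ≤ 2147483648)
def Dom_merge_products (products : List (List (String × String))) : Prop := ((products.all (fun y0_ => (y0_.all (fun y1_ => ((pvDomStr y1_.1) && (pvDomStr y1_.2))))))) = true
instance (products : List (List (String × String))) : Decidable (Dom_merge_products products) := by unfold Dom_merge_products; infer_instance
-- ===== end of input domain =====

-- B re-organises A's single stateful loop as partition-into-groups then merge-each-group
-- (same return value; both Pythons mutate the surviving head dicts in place; equivalence here is about the return value).

-- shared inner loop of both Pythons: fold one row's (key, value) pairs into a dict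
def pvDictStep (c : PySem.Dict String String) (kv : String × String) : PySem.Dict String String :=
  if c.contains kv.1 then c.modify kv.1 "" (fun old => old ++ " " ++ kv.2)
  else c.insert kv.1 kv.2

def pvMergeInto (cur row : List (String × String)) : List (String × String) :=
  (row.foldl pvDictStep (PySem.Dict.mk cur)).items

-- ===== PORT A =====
def pvStepA (st : List (List (String × String)) × List (String × String))
    (product : List (String × String)) :
    List (List (String × String)) × List (String × String) :=
  if product.length < 7 ∧ st.2 ≠ [] then (st.1, pvMergeInto st.2 product)
  else ((if st.2 ≠ [] then st.1 ++ [st.2] else st.1), product)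

def merge_products (products : List (List (String × String))) : List (List (String × String)) :=
  let st := products.foldl pvStepA ([], [])
  if st.2 ≠ [] then st.1 ++ [st.2] else st.1

-- ===== PORT B =====
def pvStepGroup (groups : List (List (List (String × String))))
    (product : List (String × String)) : List (List (List (String × String))) :=
  if 7 ≤ product.length ∨ groups = [] ∨ (groups.getLastD []).headD [] = [] then
    groups ++ [[product]]
  else
    groups.dropLast ++ [groups.getLastD [] ++ [product]]

def pvEmitStep (res : List (List (String × String))) (g : List (List (String × String))) :
    List (List (String × String)) :=
  let h := g.tail.foldl pvMergeInto (g.headD [])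
  if h ≠ [] then res ++ [h] else res

def merge_products_alt (products : List (List (String × String))) : List (List (String × String)) :=
  (products.foldl pvStepGroup []).foldl pvEmitStep []

-- ===== PRECONDITION & SPEC =====
def Spec_merge_products (products : List (List (String × String))) (out : List (List (String × String))) : Prop := out = merge_products_alt products
instance (products : List (List (String × String))) (out : List (List (String × String))) : Decidable (Spec_merge_products products out) := by unfold Spec_merge_products; infer_instance

-- ===== CLAIM (what is proved, stated in full; the proofs are below) =====
def Claim_equal_merge_products : Prop := ∀ (products : List (List (String × String))), Dom_merge_products products → Spec_merge_products products (merge_products products)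

-- ===== LEMMAS AND PROOFS =====

theorem pv_insert_items_ne_nil (d : PySem.Dict String String) (k v : String) :
    (d.insert k v).items ≠ [] := by
  rcases d with ⟨items⟩
  cases items with
  | nil => simp [PySem.Dict.insert, PySem.Dict.contains]
  | cons a l =>
      simp only [PySem.Dict.insert]
      split <;> simp

theorem pv_dictStep_items_ne_nil (c : PySem.Dict String String) (kv : String × String) :
    (pvDictStep c kv).items ≠ [] := by
  unfold pvDictStep PySem.Dict.modify
  split <;> exact pv_insert_items_ne_nil _ _ _

theorem pv_foldl_dictStep_ne_nil (row : List (String × String)) (d : PySem.Dict String String)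
    (h : d.items ≠ []) : (row.foldl pvDictStep d).items ≠ [] := by
  induction row generalizing d with
  | nil => exact h
  | cons kv rest ih => exact ih _ (pv_dictStep_items_ne_nil d kv)

theorem pv_mergeInto_ne_nil (cur row : List (String × String)) (h : cur ≠ []) :
    pvMergeInto cur row ≠ [] :=
  pv_foldl_dictStep_ne_nil row (PySem.Dict.mk cur) h

theorem pv_foldl_mergeInto_ne_nil (t : List (List (String × String)))
    (h : List (String × String)) (hh : h ≠ []) : (t.foldl pvMergeInto h) ≠ [] := by
  induction t generalizing h with
  | nil => exact hh
  | cons r rest ih => exact ih _ (pv_mergeInto_ne_nil h r hh)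

-- the loop invariant connecting A's (merged, current) state with B's groups
def pvInv (G : List (List (List (String × String))))
    (M : List (List (String × String))) (C : List (String × String)) : Prop :=
  (G = [] ∧ M = [] ∧ C = []) ∨
  ∃ gs h t, G = gs ++ [h :: t] ∧ (h = [] → t = []) ∧
    C = t.foldl pvMergeInto h ∧ M = gs.foldl pvEmitStep []

theorem pv_step (G : List (List (List (String × String))))
    (M : List (List (String × String))) (C p : List (String × String))
    (hInv : pvInv G M C) :
    pvInv (pvStepGroup G p) (pvStepA (M, C) p).1 (pvStepA (M, C) p).2 := by
  rcases hInv with ⟨hG, hM, hC⟩ | ⟨gs, h, t, hG, himp, hC, hM⟩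
  · subst hG; subst hM; subst hC
    refine Or.inr ⟨[], p, [], ?_, ?_, ?_, ?_⟩ <;> simp [pvStepGroup, pvStepA]
  · subst hG
    have hne : gs ++ [h :: t] ≠ [] := by simp
    by_cases hh : h = []
    · have ht : t = [] := himp hh
      subst ht; subst hh
      have hC0 : C = [] := hC
      subst hC0
      refine Or.inr ⟨gs ++ [[([] : List (String × String))]], p, [], ?_, ?_, ?_, ?_⟩
      · simp [pvStepGroup]
      · intro _; rfl
      · simp [pvStepA]
      · simp [pvStepA, List.foldl_append, pvEmitStep, hM]
    · have hCne : C ≠ [] := hC ▸ pv_foldl_mergeInto_ne_nil t h hh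
      by_cases hp : p.length < 7
      · -- short row merged into current product / appended to the last group
        refine Or.inr ⟨gs, h, t ++ [p], ?_, ?_, ?_, ?_⟩
        · simp [pvStepGroup, hh,
            Nat.not_le.mpr hp]
        · intro hhh; exact absurd hhh hh
        · simp [pvStepA, hp, pv_foldl_mergeInto_ne_nil t h hh, List.foldl_append, hC]
        · simp [pvStepA, hp, hCne, hM]
      · -- wide row: flush the current product / start a new group
        refine Or.inr ⟨gs ++ [h :: t], p, [], ?_, ?_, ?_, ?_⟩
        · simp [pvStepGroup, Nat.le_of_not_lt hp]
        · intro _; rfl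
        · simp [pvStepA, hp, pv_foldl_mergeInto_ne_nil t h hh, hC]
        · simp [pvStepA, hp, List.foldl_append, pvEmitStep, hC, hM,
            pv_foldl_mergeInto_ne_nil t h hh]

theorem pv_flush (G : List (List (List (String × String))))
    (M : List (List (String × String))) (C : List (String × String))
    (hInv : pvInv G M C) :
    (if C ≠ [] then M ++ [C] else M) = G.foldl pvEmitStep [] := by
  rcases hInv with ⟨hG, hM, hC⟩ | ⟨gs, h, t, hG, himp, hC, hM⟩
  · subst hG; subst hM; subst hC; simp
  · subst hG
    simp [List.foldl_append, pvEmitStep, ← hC, hM]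

theorem pv_main (ps : List (List (String × String)))
    (G : List (List (List (String × String))))
    (M : List (List (String × String))) (C : List (String × String))
    (hInv : pvInv G M C) :
    (if (ps.foldl pvStepA (M, C)).2 ≠ [] then
        (ps.foldl pvStepA (M, C)).1 ++ [(ps.foldl pvStepA (M, C)).2]
     else (ps.foldl pvStepA (M, C)).1) =
      (ps.foldl pvStepGroup G).foldl pvEmitStep [] := by
  induction ps generalizing G M C with
  | nil => simpa using pv_flush G M C hInv
  | cons p rest ih =>
      have := ih (pvStepGroup G p) (pvStepA (M, C) p).1 (pvStepA (M, C) p).2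
        (pv_step G M C p hInv)
      simpa using this

-- ===== VERDICT (by name: the statement is the Claim_ definition above) =====
theorem merge_products_spec : Claim_equal_merge_products := by
  intro products _
  unfold Spec_merge_products merge_products merge_products_alt
  simpa using (pv_main products [] [] [] (Or.inl ⟨rfl, rfl, rfl⟩))
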